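-- pv_equiv track=rewrite | github.com/JaydenPahukula/competitive-coding | Codeforces/859/C.py | check
-- ===== SOURCE A (Python) =====
-- def check(s):
--     currbit = 0
--     known = (set(), set())
--     for c in s:
--         if c in known[currbit]:
--             pass
--         elif c in known[1-currbit]:
--             return False
--         else:
--             known[currbit].add(c)
--         currbit = 1-currbit
--     return True
-- ===== SOURCE B (Python) =====
-- def check(s):
--     evens = {c for i, c in enumerate(s) if i % 2 == 0}
--     odds = {c for i, c in enumerate(s) if i % 2 == 1}
--     return evens.isdisjoint(odds)
-- ===== Notes on version B (the rewrite author's own statement) =====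
-- stated objective: simpler
-- what changed: Replaces the incremental two-set scan with toggling current bit and early return by a build-then-check decomposition: collect the set of even-position and odd-position characters from enumerate(s) and return their set disjointness.
import Mathlib
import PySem

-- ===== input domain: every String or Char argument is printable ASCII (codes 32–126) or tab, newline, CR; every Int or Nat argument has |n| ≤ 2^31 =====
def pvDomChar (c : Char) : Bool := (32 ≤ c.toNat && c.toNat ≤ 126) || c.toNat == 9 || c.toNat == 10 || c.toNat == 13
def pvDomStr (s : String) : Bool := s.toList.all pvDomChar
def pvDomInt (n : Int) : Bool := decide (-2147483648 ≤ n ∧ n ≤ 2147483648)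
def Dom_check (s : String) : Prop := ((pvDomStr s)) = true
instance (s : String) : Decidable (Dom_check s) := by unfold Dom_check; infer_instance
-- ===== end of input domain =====

-- B replaces A's incremental two-set scan (toggling a current-parity bit with early return)
-- by a build-then-check decomposition: collect the even-position and odd-position character
-- sets, then test their disjointness (objective: simpler).

-- ===== PORT A =====
-- the for-loop over s with early 'return False', state = (currbit, known); tuple indexing
-- known[currbit] ported as the 0/1 test on the Int bit
def checkLoop : List Char → Int → PySem.Set Char × PySem.Set Char → Bool
  | [], _, _ => true
  | c :: rest, currbit, known =>
    if PySem.Set.contains (if currbit == 0 then known.1 else known.2) c then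
      checkLoop rest (1 - currbit) known
    else if PySem.Set.contains (if (1 - currbit) == 0 then known.1 else known.2) c then
      false
    else
      checkLoop rest (1 - currbit)
        (if currbit == 0 then (PySem.Set.add known.1 c, known.2)
         else (known.1, PySem.Set.add known.2 c))

def check (s : String) : Bool := checkLoop s.toList 0 (PySem.Set.empty, PySem.Set.empty)

-- ===== PORT B =====
def check_alt (s : String) : Bool :=
  let evens := PySem.Set.ofList
    (((PySem.List.enumerate s.toList 0).filter (fun p => p.1 % 2 == 0)).map (fun p => p.2))
  let odds := PySem.Set.ofList
    (((PySem.List.enumerate s.toList 0).filter (fun p => p.1 % 2 == 1)).map (fun p => p.2))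
  PySem.Set.isdisjoint evens odds

-- ===== PRECONDITION & SPEC =====
def Spec_check (s : String) (out : Bool) : Prop := out = check_alt s
instance (s : String) (out : Bool) : Decidable (Spec_check s out) := by unfold Spec_check; infer_instance

-- ===== CLAIM (what is proved, stated in full; the proofs are below) =====
def Claim_equal_check : Prop := ∀ (s : String), Dom_check s → Spec_check s (check s)

-- ===== LEMMAS AND PROOFS =====

-- (evens, odds) of a list by alternating positions
def altSplit : List Char → List Char × List Char
  | [] => ([], [])
  | c :: l => ((c :: (altSplit l).2), (altSplit l).1)

theorem checkLoop_swap (l : List Char) : ∀ (k0 k1 : PySem.Set Char),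
    checkLoop l 1 (k0, k1) = checkLoop l 0 (k1, k0) := by
  induction l with
  | nil => intro k0 k1; rfl
  | cons c rest ih =>
    intro k0 k1
    by_cases hc1 : c ∈ k1 <;> by_cases hc0 : c ∈ k0 <;>
      simp [checkLoop, hc0, hc1, ih]

theorem checkLoop_zero_iff (l : List Char) : ∀ (cur oth : PySem.Set Char),
    (∀ x, ¬ (x ∈ cur ∧ x ∈ oth)) →
    (checkLoop l 0 (cur, oth) = true ↔
      ∀ x, ¬ (x ∈ cur ++ (altSplit l).1 ∧ x ∈ oth ++ (altSplit l).2)) := by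
  induction l with
  | nil =>
    intro cur oth hdisj
    simp only [checkLoop, altSplit, List.append_nil, true_iff]
    exact fun x hx => hdisj x hx
  | cons c rest ih =>
    intro cur oth hdisj
    simp only [altSplit]
    by_cases hc0 : c ∈ cur
    · have hstep : checkLoop (c :: rest) 0 (cur, oth) = checkLoop rest 0 (oth, cur) := by
        simp [checkLoop, hc0, checkLoop_swap]
      have key : ∀ x, x ∈ cur ++ (c :: (altSplit rest).2) ↔ x ∈ cur ++ (altSplit rest).2 := by
        intro x
        simp only [List.mem_append, List.mem_cons]
        constructor
        · rintro (h | rfl | h)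
          exacts [Or.inl h, Or.inl hc0, Or.inr h]
        · rintro (h | h)
          exacts [Or.inl h, Or.inr (Or.inr h)]
      rw [hstep, ih oth cur (fun x hx => hdisj x ⟨hx.2, hx.1⟩)]
      constructor
      · intro H x hx; exact H x ⟨hx.2, (key x).mp hx.1⟩
      · intro H x hx; exact H x ⟨(key x).mpr hx.2, hx.1⟩
    · by_cases hc1 : c ∈ oth
      · have hstep : checkLoop (c :: rest) 0 (cur, oth) = false := by
          simp [checkLoop, hc0, hc1]
        rw [hstep]
        apply iff_of_false (by simp)
        intro H
        exact H c ⟨by simp, by simp [hc1]⟩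
      · have hstep : checkLoop (c :: rest) 0 (cur, oth)
            = checkLoop rest 0 (oth, PySem.Set.add cur c) := by
          simp [checkLoop, hc0, hc1, checkLoop_swap]
        have hdisj' : ∀ x, ¬ (x ∈ oth ∧ x ∈ PySem.Set.add cur c) := by
          intro x hx
          rcases (PySem.Set.mem_add _ _ _).mp hx.2 with h | rfl
          · exact hdisj x ⟨h, hx.1⟩
          · exact hc1 hx.1
        have key : ∀ x, x ∈ PySem.Set.add cur c ++ (altSplit rest).2
            ↔ x ∈ cur ++ (c :: (altSplit rest).2) := by
          intro x
          simp only [List.mem_append, List.mem_cons, PySem.Set.mem_add]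
          tauto
        rw [hstep, ih oth (PySem.Set.add cur c) hdisj']
        constructor
        · intro H x hx; exact H x ⟨hx.2, (key x).mpr hx.1⟩
        · intro H x hx; exact H x ⟨(key x).mp hx.2, hx.1⟩

theorem filter_enumerate_even (l : List Char) (k : Int) :
    ((PySem.List.enumerate l k).filter (fun p => p.1 % 2 == 0)).map (fun p => p.2)
      = if k % 2 = 0 then (altSplit l).1 else (altSplit l).2 := by
  induction l generalizing k with
  | nil => simp [PySem.List.enumerate_nil, altSplit]
  | cons c l ih =>
    rw [PySem.List.enumerate_cons]
    by_cases hk : k % 2 = 0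
    · have hk1 : (k + 1) % 2 = 1 := by omega
      simp [altSplit, hk, hk1, ih]
    · have hk' : k % 2 = 1 := by omega
      have hk1 : (k + 1) % 2 = 0 := by omega
      simp [altSplit, hk', hk1, ih]

theorem filter_enumerate_odd (l : List Char) (k : Int) :
    ((PySem.List.enumerate l k).filter (fun p => p.1 % 2 == 1)).map (fun p => p.2)
      = if k % 2 = 0 then (altSplit l).2 else (altSplit l).1 := by
  induction l generalizing k with
  | nil => simp [PySem.List.enumerate_nil, altSplit]
  | cons c l ih =>
    rw [PySem.List.enumerate_cons]
    by_cases hk : k % 2 = 0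
    · have hk1 : (k + 1) % 2 = 1 := by omega
      simp [altSplit, hk, hk1, ih]
    · have hk' : k % 2 = 1 := by omega
      have hk1 : (k + 1) % 2 = 0 := by omega
      simp [altSplit, hk', hk1, ih]

-- ===== VERDICT (by name: the statement is the Claim_ definition above) =====
theorem check_spec : Claim_equal_check := by
  intro s _
  unfold Spec_check
  rw [Bool.eq_iff_iff]
  unfold check check_alt
  rw [checkLoop_zero_iff _ _ _ (by simp [PySem.Set.empty])]
  rw [PySem.Set.isdisjoint_iff]
  simp [filter_enumerate_even, filter_enumerate_odd, PySem.Set.mem_ofList,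
    PySem.Set.empty]
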